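-- pv_equiv track=rewrite | github.com/TimeApollo/molecules | molecule.py | check_for_valid_combo
-- ===== SOURCE A (Python) =====
-- def check_for_valid_combo(pos_combo, mol_perm):
--     """Compares a single combo(range of potential coordinates)
--     to a single permutation"""
--     # need to subtract 1 to only account for gap and not include endpoint
--     x_gap, y_gap = pos_combo[0] - 1, pos_combo[1] - 1
--     s1, s2, s3, s4 = mol_perm
--     # Loops over s1 for possible first intersection comparing s1 to s2.
--     for i_s1 in range(1, 11 - x_gap):
--         # Loops over second string and intersections with first, s1 s2
--         for i_s2 in range(1, 11 - y_gap):
--             # test if first intersection is equal, s1, s2, if equal continue.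
--             if s1[i_s1] == s2[i_s2]:
--                 # Loops over third string and intersections with second, s2 s3
--                 for i_s3 in range(1, 11 - x_gap):
--                     # if intersection is equal, s2, s3, continue.
--                     if s2[i_s2 + y_gap] == s3[i_s3]:
--                         # if 3 previous intersections are true,
--                         # loop over s4 for possible intersections.
--                         for i_s4 in range(1, 11 - y_gap):
--                             # compare s4 to s3/s1 with gap
--                             if (s1[i_s1 + x_gap] == s4[i_s4]
--                                and s3[i_s3 + x_gap] == s4[i_s4 + y_gap]):
--                                 return True
--     return False
-- ===== SOURCE B (Python) =====
-- def check_for_valid_combo(pos_combo, mol_perm):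
--     """Relational reformulation: the four index loops decouple into four
--     character-pair relations P1..P4; a combo exists iff the relation
--     compositions P1;P4 and P2;P3 share an element."""
--     x_gap, y_gap = pos_combo[0] - 1, pos_combo[1] - 1
--     s1, s2, s3, s4 = mol_perm
--     rx = range(1, 11 - x_gap)
--     ry = range(1, 11 - y_gap)
--     if not rx or not ry:
--         return False
--     p1 = {(s1[i], s1[i + x_gap]) for i in rx}
--     p2 = {(s2[i], s2[i + y_gap]) for i in ry}
--     p3 = {(s3[i], s3[i + x_gap]) for i in rx}
--     p4 = {(s4[i], s4[i + y_gap]) for i in ry}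
--     q14 = {(a, d) for (a, c) in p1 for (c2, d) in p4 if c == c2}
--     q23 = {(a, d) for (a, b) in p2 for (b2, d) in p3 if b == b2}
--     return not q14.isdisjoint(q23)
-- ===== Notes on version B (the rewrite author's own statement) =====
-- stated objective: alternative
-- what changed: Reformulates the search as a relational join: the four index loops decouple into four character-pair relations P1..P4, B computes the relation compositions P1;P4 and P2;P3 as sets and returns whether they intersect (non-disjointness), with no nested index scan or early return.
-- outside the precondition, e.g. on check_for_valid_combo((10, 2), ('ca', '90cbbyyaca0 a', 'y9x', 'zczb1y9a')): A returns False, B raises IndexError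
import Mathlib
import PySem

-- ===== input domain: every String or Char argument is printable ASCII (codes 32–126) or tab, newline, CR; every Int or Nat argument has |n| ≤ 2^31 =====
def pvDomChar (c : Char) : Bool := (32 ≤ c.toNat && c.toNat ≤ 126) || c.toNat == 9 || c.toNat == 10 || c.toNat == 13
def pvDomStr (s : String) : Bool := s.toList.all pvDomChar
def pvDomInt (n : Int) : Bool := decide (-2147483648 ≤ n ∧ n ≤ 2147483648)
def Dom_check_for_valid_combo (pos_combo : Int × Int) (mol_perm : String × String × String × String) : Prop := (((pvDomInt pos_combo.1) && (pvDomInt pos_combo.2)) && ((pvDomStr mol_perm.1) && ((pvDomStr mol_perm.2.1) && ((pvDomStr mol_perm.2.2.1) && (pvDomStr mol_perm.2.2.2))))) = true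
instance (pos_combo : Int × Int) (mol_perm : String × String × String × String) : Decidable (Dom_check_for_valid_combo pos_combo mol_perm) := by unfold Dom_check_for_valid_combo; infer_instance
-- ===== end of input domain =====

-- B reformulates the nested-loop search as a relational join: four character-pair relations,
-- two compositions, one disjointness test (objective: alternative structure, same bounded cost;
-- return value only — no side effects involved).

-- ===== PORT A =====
-- Indexing s[i] is ported as PySem.Str.pyGet? (Option Char); inside Pre_ every access is `some`,
-- so comparing the Options with == is exactly Python's char comparison there.
def check_for_valid_combo (pos_combo : Int × Int) (mol_perm : String × String × String × String) : Bool :=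
  let x_gap := pos_combo.1 - 1
  let y_gap := pos_combo.2 - 1
  match mol_perm with
  | (s1, s2, s3, s4) =>
    (PySem.List.pyRange 1 (11 - x_gap) 1).any fun i1 =>
      (PySem.List.pyRange 1 (11 - y_gap) 1).any fun i2 =>
        PySem.Str.pyGet? s1 i1 == PySem.Str.pyGet? s2 i2 &&
        ((PySem.List.pyRange 1 (11 - x_gap) 1).any fun i3 =>
          PySem.Str.pyGet? s2 (i2 + y_gap) == PySem.Str.pyGet? s3 i3 &&
          ((PySem.List.pyRange 1 (11 - y_gap) 1).any fun i4 =>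
            PySem.Str.pyGet? s1 (i1 + x_gap) == PySem.Str.pyGet? s4 i4 &&
            PySem.Str.pyGet? s3 (i3 + x_gap) == PySem.Str.pyGet? s4 (i4 + y_gap)))

-- ===== PORT B =====
-- `not rx` / `not ry` on the lazy range objects is exactly `11 - gap ≤ 1` (step 1).
def check_for_valid_combo_alt (pos_combo : Int × Int) (mol_perm : String × String × String × String) : Bool :=
  let x_gap := pos_combo.1 - 1
  let y_gap := pos_combo.2 - 1
  match mol_perm with
  | (s1, s2, s3, s4) =>
    if 11 - x_gap ≤ 1 || 11 - y_gap ≤ 1 then false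
    else
      let rx := PySem.List.pyRange 1 (11 - x_gap) 1
      let ry := PySem.List.pyRange 1 (11 - y_gap) 1
      let p1 := PySem.Set.ofList (rx.map fun i => (PySem.Str.pyGet? s1 i, PySem.Str.pyGet? s1 (i + x_gap)))
      let p2 := PySem.Set.ofList (ry.map fun i => (PySem.Str.pyGet? s2 i, PySem.Str.pyGet? s2 (i + y_gap)))
      let p3 := PySem.Set.ofList (rx.map fun i => (PySem.Str.pyGet? s3 i, PySem.Str.pyGet? s3 (i + x_gap)))
      let p4 := PySem.Set.ofList (ry.map fun i => (PySem.Str.pyGet? s4 i, PySem.Str.pyGet? s4 (i + y_gap)))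
      let q14 := PySem.Set.ofList (p1.flatMap fun ac => (p4.filter fun cd => cd.1 == ac.2).map fun cd => (ac.1, cd.2))
      let q23 := PySem.Set.ofList (p2.flatMap fun ab => (p3.filter fun bd => bd.1 == ab.2).map fun bd => (ab.1, bd.2))
      !(PySem.Set.isdisjoint q14 q23)

-- ===== PRECONDITION & SPEC =====
-- Pre_ excludes the inputs on which Python A raises IndexError, plus inputs whose only defined
-- behaviour comes from negative-index wraparound or from strings just long enough for the
-- character mismatches A happens to hit: a closed-form sufficient condition — either one of the
-- two loop ranges is empty (A returns False touching nothing), or both gaps are nonnegative and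
-- all four strings have length ≥ 11, so every index A or B can touch is a valid nonnegative one.
def Pre_check_for_valid_combo (pos_combo : Int × Int) (mol_perm : String × String × String × String) : Prop :=
  11 ≤ pos_combo.1 ∨ 11 ≤ pos_combo.2 ∨
  (1 ≤ pos_combo.1 ∧ 1 ≤ pos_combo.2 ∧
   11 ≤ PySem.Str.len mol_perm.1 ∧ 11 ≤ PySem.Str.len mol_perm.2.1 ∧
   11 ≤ PySem.Str.len mol_perm.2.2.1 ∧ 11 ≤ PySem.Str.len mol_perm.2.2.2)
instance (pos_combo : Int × Int) (mol_perm : String × String × String × String) : Decidable (Pre_check_for_valid_combo pos_combo mol_perm) := by unfold Pre_check_for_valid_combo; infer_instance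

def pvWitness_check_for_valid_combo : (Int × Int) × (String × String × String × String) :=
  ((2, 2), ("abcdefghijk", "bbbbbbbbbbb", "bbbbbbbbbbb", "ccccccccccc"))

def Spec_check_for_valid_combo (pos_combo : Int × Int) (mol_perm : String × String × String × String) (out : Bool) : Prop := out = check_for_valid_combo_alt pos_combo mol_perm
instance (pos_combo : Int × Int) (mol_perm : String × String × String × String) (out : Bool) : Decidable (Spec_check_for_valid_combo pos_combo mol_perm out) := by unfold Spec_check_for_valid_combo; infer_instance

-- ===== CLAIM (what is proved, stated in full; the proofs are below) =====
def Claim_equal_check_for_valid_combo : Prop := ∀ (pos_combo : Int × Int) (mol_perm : String × String × String × String), Dom_check_for_valid_combo pos_combo mol_perm → Pre_check_for_valid_combo pos_combo mol_perm → Spec_check_for_valid_combo pos_combo mol_perm (check_for_valid_combo pos_combo mol_perm)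

-- ===== LEMMAS AND PROOFS =====

-- The two ports agree on EVERY input (Pre_ is only needed for the Python sides).
theorem ports_eq (pos_combo : Int × Int) (mol_perm : String × String × String × String) :
    check_for_valid_combo pos_combo mol_perm = check_for_valid_combo_alt pos_combo mol_perm := by
  obtain ⟨p, q⟩ := pos_combo
  obtain ⟨s1, s2, s3, s4⟩ := mol_perm
  simp only [check_for_valid_combo, check_for_valid_combo_alt]
  by_cases hx : 11 - (p - 1) ≤ 1
  · rw [PySem.List.pyRange_one_eq_nil (by omega : (11 : Int) - (p - 1) ≤ 1)]
    simp [hx]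
  · by_cases hy : 11 - (q - 1) ≤ 1
    · rw [PySem.List.pyRange_one_eq_nil (show (11 : Int) - (q - 1) ≤ 1 from by omega)]
      simp [hy]
    · rw [if_neg (by simp [hx, hy])]
      apply Bool.eq_iff_iff.mpr
      simp only [List.any_eq_true, Bool.and_eq_true, beq_iff_eq, Bool.not_eq_true',
        Bool.eq_false_iff, Ne, PySem.Set.isdisjoint_iff]
      push Not
      simp only [PySem.Set.mem_ofList, List.mem_flatMap, List.mem_filter, List.mem_map,
        beq_iff_eq, Prod.exists, Prod.mk.injEq]
      constructor
      · rintro ⟨i1, hi1, i2, hi2, h12, i3, hi3, h23, i4, hi4, h14, h34⟩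
        exact ⟨_, _, ⟨_, _, ⟨i1, hi1, rfl, rfl⟩, _, _, ⟨⟨i4, hi4, rfl, rfl⟩, h14.symm⟩, rfl, rfl⟩,
          _, _, ⟨i2, hi2, rfl, rfl⟩, _, _, ⟨⟨i3, hi3, rfl, rfl⟩, h23.symm⟩, h12.symm, h34⟩
      · rintro ⟨a, b, ⟨a1, b1, ⟨i1, hi1, rfl, rfl⟩, a2, b2, ⟨⟨i4, hi4, rfl, rfl⟩, h41⟩, rfl, rfl⟩,
          a1', b1', ⟨i2, hi2, rfl, rfl⟩, a2', b2', ⟨⟨i3, hi3, rfl, rfl⟩, h32⟩, h2a, h3b⟩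
        exact ⟨i1, hi1, i2, hi2, h2a.symm, i3, hi3, h32.symm, i4, hi4, h41.symm, h3b⟩

-- ===== VERDICT (by name: the statement is the Claim_ definition above) =====
theorem check_for_valid_combo_spec : Claim_equal_check_for_valid_combo := by
  intro pos_combo mol_perm _ _
  unfold Spec_check_for_valid_combo
  exact ports_eq pos_combo mol_perm
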